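-- pv_equiv track=rewrite | github.com/gersonraulb-sketch/ejedef | eje87.py | encontrar_pares_cercanos
-- ===== SOURCE A (Python) =====
-- def encontrar_pares_cercanos(nums,k):
--     s=set()
--     res=[]
--     for x in nums:
--         if x-k in s or x+k in s:
--             res.append(x)
--         s.add(x)
--     return res
-- ===== SOURCE B (Python) =====
-- def encontrar_pares_cercanos(nums, k):
--     # Pass 1: earliest occurrence index of each value.
--     first = {}
--     for i, x in enumerate(nums):
--         if x not in first:
--             first[x] = i
--     # Pass 2: x qualifies iff x-k or x+k occurs strictly earlier.
--     res = []
--     for i, x in enumerate(nums):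
--         if (x - k in first and first[x - k] < i) or (x + k in first and first[x + k] < i):
--             res.append(x)
--     return res
-- ===== Notes on version B (the rewrite author's own statement) =====
-- stated objective: alternative
-- what changed: Replaces the single running-set scan with a two-pass decomposition: a first pass records each value's earliest index in a dict, and a second enumerate pass emits x when x-k or x+k has an earliest index strictly before the current position.
import Mathlib
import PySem

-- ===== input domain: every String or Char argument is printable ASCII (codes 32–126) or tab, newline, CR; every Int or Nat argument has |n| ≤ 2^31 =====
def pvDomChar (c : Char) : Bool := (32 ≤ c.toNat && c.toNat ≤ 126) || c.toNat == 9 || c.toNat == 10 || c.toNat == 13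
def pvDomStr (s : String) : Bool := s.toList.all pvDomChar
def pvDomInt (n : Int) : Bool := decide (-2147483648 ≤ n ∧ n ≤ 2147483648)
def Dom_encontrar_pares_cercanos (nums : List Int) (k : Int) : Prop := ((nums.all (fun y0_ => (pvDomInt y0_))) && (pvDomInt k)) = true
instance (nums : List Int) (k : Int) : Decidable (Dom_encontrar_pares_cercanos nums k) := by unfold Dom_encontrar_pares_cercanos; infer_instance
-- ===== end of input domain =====

-- B replaces A's single running-set scan by a two-pass decomposition (earliest-index dict, then an
-- enumerate pass with a strict '<' test); same cost, return value proved equal.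

-- ===== PORT A =====
def encontrar_pares_cercanos (nums : List Int) (k : Int) : List Int :=
  (nums.foldl
    (fun (st : PySem.Set Int × List Int) x =>
      (PySem.Set.add st.1 x,
       if PySem.Set.contains st.1 (x - k) || PySem.Set.contains st.1 (x + k)
       then st.2 ++ [x] else st.2))
    (PySem.Set.empty, [])).2

-- ===== PORT B =====
-- B-side helper: pass 1, the earliest occurrence index of each value
def pvFirstIdx (nums : List Int) : PySem.Dict Int Int :=
  (PySem.List.enumerate nums 0).foldl
    (fun d p => if d.contains p.2 then d else d.insert p.2 p.1)
    PySem.Dict.empty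

-- B-side helper: 'v in first and first[v] < i'
def pvHit (first : PySem.Dict Int Int) (v i : Int) : Bool :=
  first.contains v && decide (first.getD v 0 < i)

def encontrar_pares_cercanos_alt (nums : List Int) (k : Int) : List Int :=
  let first := pvFirstIdx nums
  (PySem.List.enumerate nums 0).foldl
    (fun res p =>
      if pvHit first (p.2 - k) p.1 || pvHit first (p.2 + k) p.1
      then res ++ [p.2] else res)
    []

-- ===== PRECONDITION & SPEC =====
def Spec_encontrar_pares_cercanos (nums : List Int) (k : Int) (out : List Int) : Prop := out = encontrar_pares_cercanos_alt nums k
instance (nums : List Int) (k : Int) (out : List Int) : Decidable (Spec_encontrar_pares_cercanos nums k out) := by unfold Spec_encontrar_pares_cercanos; infer_instance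

-- ===== CLAIM (what is proved, stated in full; the proofs are below) =====
def Claim_equal_encontrar_pares_cercanos : Prop := ∀ (nums : List Int) (k : Int), Dom_encontrar_pares_cercanos nums k → Spec_encontrar_pares_cercanos nums k (encontrar_pares_cercanos nums k)

-- ===== LEMMAS AND PROOFS =====

-- get? of the first-index fold: an already-present key keeps its value; otherwise the first index in xs, offset by s
theorem pvGet_firstFold (xs : List Int) : ∀ (s : Int) (d : PySem.Dict Int Int) (v : Int),
    ((PySem.List.enumerate xs s).foldl
        (fun d p => if d.contains p.2 then d else d.insert p.2 p.1) d).get? v =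
      match d.get? v with
      | some j => some j
      | none => (xs.findIdx? (· == v)).map (fun n => s + (n : Int)) := by
  induction xs with
  | nil =>
    intro s d v
    cases h : d.get? v <;> simp [PySem.List.enumerate_nil, h]
  | cons x xs ih =>
    intro s d v
    rw [PySem.List.enumerate_cons, List.foldl_cons]
    dsimp only
    by_cases hc : d.contains x = true
    · rw [if_pos hc, ih]
      cases hd : d.get? v with
      | some j => rfl
      | none =>
        have hvx : x ≠ v := by
          intro h
          have h2 := (PySem.Dict.get?_eq_none_iff_contains d v).mp hd
          rw [← h] at h2
          rw [h2] at hc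
          exact Bool.false_ne_true hc
        simp only [List.findIdx?_cons, beq_iff_eq, hvx, if_false]
        cases xs.findIdx? (· == v) <;> simp
        omega
    · rw [if_neg hc, ih]
      by_cases hv : v = x
      · subst hv
        rw [PySem.Dict.get?_insert_self]
        rw [(PySem.Dict.get?_eq_none_iff_contains d v).mpr (by simpa using hc)]
        simp [List.findIdx?_cons]
      · rw [PySem.Dict.get?_insert_of_ne d s hv]
        cases hd : d.get? v with
        | some j => rfl
        | none =>
          have hxv : x ≠ v := fun h => hv h.symm
          simp only [List.findIdx?_cons, beq_iff_eq, hxv, if_false]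
          cases xs.findIdx? (· == v) <;> simp
          omega

-- membership in a prefix ↔ the first index is below the cut
theorem pvMemTake (xs : List Int) : ∀ (v : Int) (m : Nat),
    v ∈ xs.take m ↔ ∃ n, xs.findIdx? (· == v) = some n ∧ n < m := by
  induction xs with
  | nil => intro v m; simp
  | cons x xs ih =>
    intro v m
    cases m with
    | zero => simp
    | succ m =>
      by_cases hv : x = v
      · subst hv
        simp [List.findIdx?_cons]
      · simp only [List.take_succ_cons, List.mem_cons, List.findIdx?_cons, beq_iff_eq, hv,
          if_false, ih v m]
        constructor
        · rintro (h | ⟨n, hn, hlt⟩)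
          · exact absurd h.symm hv
          · exact ⟨n + 1, by simp [hn], by omega⟩
        · rintro ⟨n, hn, hlt⟩
          cases h2 : xs.findIdx? (· == v) with
          | none => rw [h2] at hn; simp at hn
          | some n' =>
            rw [h2] at hn; simp at hn
            subst hn
            exact Or.inr ⟨n', rfl, by omega⟩

-- B's dict test at cut m is exactly membership in the length-m prefix
theorem pvHit_eq (nums : List Int) (v : Int) (m : Nat) :
    pvHit (pvFirstIdx nums) v (m : Int) = decide (v ∈ nums.take m) := by
  unfold pvHit pvFirstIdx
  rw [PySem.Dict.contains_eq_isSome_get?, PySem.Dict.getD_eq_get?_getD,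
    pvGet_firstFold nums 0 PySem.Dict.empty v, PySem.Dict.get?_empty]
  cases h : nums.findIdx? (· == v) with
  | none =>
    have hm : ¬ v ∈ nums.take m := by
      rw [pvMemTake]; rintro ⟨n, hn, _⟩; rw [h] at hn; cases hn
    simp [hm]
  | some n =>
    have hm : (v ∈ nums.take m) ↔ n < m := by
      rw [pvMemTake]
      constructor
      · rintro ⟨n', hn, hlt⟩; rw [h] at hn; injection hn with e; omega
      · intro hlt; exact ⟨n, h, hlt⟩
    simp only [hm]
    simp

-- Set.contains of ofList is membership
theorem pvContains_ofList (pre : List Int) (v : Int) :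
    PySem.Set.contains (PySem.Set.ofList pre) v = decide (v ∈ pre) := by
  by_cases h : v ∈ pre <;> simp [h, PySem.Set.mem_ofList]

-- main correspondence: A's remaining loop, run from the set of the processed prefix, equals B's
-- enumerate loop started at the prefix length
theorem pvFold_eq (nums : List Int) (k : Int) : ∀ (xs pre res : List Int), pre ++ xs = nums →
    (xs.foldl
      (fun (st : PySem.Set Int × List Int) x =>
        (PySem.Set.add st.1 x,
         if PySem.Set.contains st.1 (x - k) || PySem.Set.contains st.1 (x + k)
         then st.2 ++ [x] else st.2))
      (PySem.Set.ofList pre, res)).2 =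
    (PySem.List.enumerate xs (pre.length : Int)).foldl
      (fun res p =>
        if pvHit (pvFirstIdx nums) (p.2 - k) p.1 || pvHit (pvFirstIdx nums) (p.2 + k) p.1
        then res ++ [p.2] else res)
      res := by
  intro xs
  induction xs with
  | nil => intro pre res h; simp [PySem.List.enumerate_nil]
  | cons x xs ih =>
    intro pre res h
    have hpre : nums.take pre.length = pre := by
      rw [← h]; exact List.take_left
    have hcond : ∀ v : Int, PySem.Set.contains (PySem.Set.ofList pre) v
        = pvHit (pvFirstIdx nums) v (pre.length : Int) := by
      intro v
      rw [pvContains_ofList, pvHit_eq, hpre]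
    rw [List.foldl_cons, PySem.List.enumerate_cons, List.foldl_cons]
    dsimp only
    have hadd : PySem.Set.add (PySem.Set.ofList pre) x = PySem.Set.ofList (pre ++ [x]) :=
      (PySem.Set.ofList_append_singleton pre x).symm
    have hlen : ((pre ++ [x]).length : Int) = (pre.length : Int) + 1 := by simp
    have h2 := ih (pre ++ [x])
      (if PySem.Set.contains (PySem.Set.ofList pre) (x - k)
          || PySem.Set.contains (PySem.Set.ofList pre) (x + k)
       then res ++ [x] else res)
      (by rw [List.append_assoc]; exact h)
    rw [hadd, h2, hlen, hcond (x - k), hcond (x + k)]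

-- ===== VERDICT (by name: the statement is the Claim_ definition above) =====
theorem encontrar_pares_cercanos_spec : Claim_equal_encontrar_pares_cercanos := by
  intro nums k _
  unfold Spec_encontrar_pares_cercanos encontrar_pares_cercanos encontrar_pares_cercanos_alt
  exact pvFold_eq nums k nums [] [] rfl
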